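-- pv_equiv track=rewrite | github.com/jakubro/solve2048 | solve2048/utils.py | justify_table
-- ===== SOURCE A (Python) =====
-- from typing import List
--
-- def justify_table(table: List[List[str]]) -> str:
--     maxlens = []
--
--     for row in table:
--         for i, col in enumerate(row):
--             len_ = len(col)
--             try:
--                 maxlens[i] = max(maxlens[i], len_)
--             except IndexError:
--                 maxlens.append(len_)
--
--     rv = ""
--     for row in table:
--         for i, col in enumerate(row):
--             rv += col.ljust(maxlens[i], " ") + "\t"
--         rv += "\n"
--     return rv
-- ===== SOURCE B (Python) =====
-- from typing import List
--
-- def justify_table(table: List[List[str]]) -> str: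
--     # Column-major rendering: grow one line buffer per row, column by column,
--     # computing each column's width only when that column is rendered.
--     bufs = [""] * len(table)
--     i = 0
--     while any(i < len(r) for r in table):
--         w = max(len(r[i]) for r in table if i < len(r))
--         bufs = [b + (r[i] + " " * (w - len(r[i])) + "\t" if i < len(r) else "")
--                 for b, r in zip(bufs, table)]
--         i += 1
--     return "".join(b + "\n" for b in bufs)
-- ===== Notes on version B (the rewrite author's own statement) =====
-- stated objective: alternative
-- what changed: B renders the table column-major in a single while-loop over column indices: it keeps one growing line buffer per row (no widths list at all) and, for each column in turn, computes that column's width on the spot and appends the padded cell to every row's buffer, joining the buffers with newlines at the end; A makes two row-major passes, first growing/updating a widths list, then ljust-ing row by row.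
import Mathlib
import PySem

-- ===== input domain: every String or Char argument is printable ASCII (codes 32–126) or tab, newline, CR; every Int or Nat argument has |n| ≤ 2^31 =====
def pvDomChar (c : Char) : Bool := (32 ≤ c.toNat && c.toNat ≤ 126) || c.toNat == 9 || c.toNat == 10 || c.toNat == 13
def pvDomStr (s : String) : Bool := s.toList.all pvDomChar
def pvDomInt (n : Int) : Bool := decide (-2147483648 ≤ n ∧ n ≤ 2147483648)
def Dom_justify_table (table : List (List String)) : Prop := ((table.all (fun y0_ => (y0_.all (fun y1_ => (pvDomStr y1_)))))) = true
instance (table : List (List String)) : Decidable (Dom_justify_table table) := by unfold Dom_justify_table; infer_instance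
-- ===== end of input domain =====

-- B renders the table column-major — one growing line buffer per row, each column's width
-- computed only when that column is rendered — instead of A's two row-major passes
-- (grow-a-widths-list, then ljust row by row); same return value (alternative decomposition).

-- ===== PORT A =====

-- port of Python's s.ljust(w, fill): pad on the right to width w
-- (exact: pads max(0, w - len(s)) fill characters)
def pyLjust (cs : List Char) (w : Int) (fill : Char) : List Char :=
  cs ++ List.replicate (w.toNat - cs.length) fill

-- body of A's first loop: 'try: maxlens[i] = max(maxlens[i], len_) except IndexError: maxlens.append(len_)'
def growCell (m : List Int) (i : Int) (len_ : Int) : List Int :=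
  match PySem.List.pyGet? m i with
  | some v => PySem.List.pySetD m i (max v len_)   -- in range: the assignment cannot raise
  | none => m ++ [len_]                            -- the IndexError branch: append

-- 'for i, col in enumerate(row): …' of A's first loop
def growAux (m : List Int) (i : Int) : List String → List Int
  | [] => m
  | col :: rest => growAux (growCell m i (PySem.Str.len col)) (i + 1) rest

-- 'for i, col in enumerate(row): rv += col.ljust(maxlens[i], " ") + "\t"'
-- (maxlens[i] is always in range here — the first pass visited index i — so pyGetD is exact)
def renderAux (m : List Int) (rv : List Char) (i : Int) : List String → List Char
  | [] => rv
  | col :: rest =>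
      renderAux m (rv ++ pyLjust col.toList (PySem.List.pyGetD m i 0) ' ' ++ ['\t']) (i + 1) rest

def justify_table (table : List (List String)) : String :=
  let maxlens := table.foldl (fun m row => growAux m 0 row) []
  String.ofList (table.foldl (fun rv row => renderAux maxlens rv 0 row ++ ['\n']) [])

-- ===== PORT B =====

-- 'max(len(r[i]) for r in table if i < len(r))' (the loop only calls it when nonempty,
-- so the .getD 0 never supplies the empty-max exception path's value)
def colMax (table : List (List String)) (i : Int) : Int :=
  ((PySem.List.max? ((table.filter (fun r => i < PySem.List.len r)).map
      (fun r => PySem.Str.len (PySem.List.pyGetD r i ""))) (fun x => x)).getD 0)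

-- 'r[i] + " " * (w - len(r[i])) + "\t"' (in range under the guard; " " * n is empty for n ≤ 0)
def cellB (r : List String) (i w : Int) : List Char :=
  (PySem.List.pyGetD r i "").toList
    ++ List.replicate (w - PySem.Str.len (PySem.List.pyGetD r i "")).toNat ' '
    ++ ['\t']

-- bound used only for the termination measure of B's while loop
def tableMaxLen (table : List (List String)) : Nat :=
  (table.map List.length).foldr max 0

theorem len_le_tableMaxLen {table : List (List String)} {r : List String} (h : r ∈ table) :
    r.length ≤ tableMaxLen table := by
  induction table with
  | nil => cases h
  | cons a t ih =>
    rw [tableMaxLen, List.map_cons, List.foldr_cons]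
    rcases List.mem_cons.mp h with rfl | h
    · exact Nat.le_max_left _ _
    · exact le_trans (ih h) (Nat.le_max_right _ _)

-- 'while any(i < len(r) for r in table): …' — the list comprehension over zip(bufs, table)
def renderCols (table : List (List String)) (bufs : List (List Char)) (i : Int) :
    List (List Char) :=
  if h : table.any (fun r => i < PySem.List.len r) then
    let w := colMax table i
    renderCols table
      (List.zipWith (fun b r => if i < PySem.List.len r then b ++ cellB r i w else b) bufs table)
      (i + 1)
  else bufs
termination_by ((tableMaxLen table : Int) - i).toNat
decreasing_by
  simp only [List.any_eq_true, decide_eq_true_eq, PySem.List.len_eq] at h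
  obtain ⟨r, hr, hlt⟩ := h
  have := len_le_tableMaxLen hr
  omega

def justify_table_alt (table : List (List String)) : String :=
  let bufs := List.replicate table.length ([] : List Char)
  String.ofList ((renderCols table bufs 0).map (fun b => b ++ ['\n'])).flatten

-- ===== PRECONDITION & SPEC =====
def Spec_justify_table (table : List (List String)) (out : String) : Prop := out = justify_table_alt table
instance (table : List (List String)) (out : String) : Decidable (Spec_justify_table table out) := by unfold Spec_justify_table; infer_instance

-- ===== CLAIM (what is proved, stated in full; the proofs are below) =====
def Claim_equal_justify_table : Prop := ∀ (table : List (List String)), Dom_justify_table table → Spec_justify_table table (justify_table table)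

-- ===== LEMMAS AND PROOFS =====

-- combine two optional running maxima
def omerge : Option Int → Option Int → Option Int
  | a, none => a
  | some a, some b => some (max a b)
  | none, some b => some b

theorem omerge_none_right (a : Option Int) : omerge a none = a := by cases a <;> rfl

theorem pyGet?_nonneg {α : Type} (xs : List α) (i : Int) (h0 : 0 ≤ i) :
    PySem.List.pyGet? xs i = xs[i.toNat]? := by
  unfold PySem.List.pyGet? PySem.List.pyIdx?
  rw [if_pos h0]
  split <;> rename_i h1
  · simp
  · simp [List.getElem?_eq_none (by omega : xs.length ≤ i.toNat)]

theorem pyGetD_nonneg {α : Type} (xs : List α) (i : Int) (d : α) (h0 : 0 ≤ i) :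
    PySem.List.pyGetD xs i d = xs[i.toNat]?.getD d := by
  unfold PySem.List.pyGetD
  rw [pyGet?_nonneg _ _ h0]

theorem growCell_getElem? (m : List Int) (i L : Int) (h0 : 0 ≤ i) (h1 : i ≤ (m.length : Int))
    (j : Nat) :
    (growCell m i L)[j]? = if j = i.toNat then omerge m[j]? (some L) else m[j]? := by
  unfold growCell
  rw [pyGet?_nonneg _ _ h0]
  by_cases h : i < (m.length : Int)
  · rw [List.getElem?_eq_getElem (by omega : i.toNat < m.length)]
    simp only [PySem.List.pySetD_of_nonneg m _ h0, List.getElem?_set]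
    by_cases hj : j = i.toNat
    · rw [if_pos hj, if_pos hj.symm, hj,
        List.getElem?_eq_getElem (by omega : i.toNat < m.length)]
      rw [if_pos (by omega : i.toNat < m.length)]
      rfl
    · rw [if_neg hj, if_neg (Ne.symm hj)]
  · rw [List.getElem?_eq_none (by omega : m.length ≤ i.toNat)]
    by_cases hj : j = i.toNat
    · rw [if_pos hj, hj, List.getElem?_eq_none (by omega : m.length ≤ i.toNat),
        List.getElem?_append_right (by omega : m.length ≤ i.toNat)]
      have : i.toNat - m.length = 0 := by omega
      rw [this]
      rfl
    · rw [if_neg hj]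
      by_cases hj2 : j < m.length
      · rw [List.getElem?_append_left hj2]
      · rw [List.getElem?_eq_none (by omega : m.length ≤ j),
            List.getElem?_eq_none (by simp; omega : (m ++ [L]).length ≤ j)]

theorem growCell_length (m : List Int) (i L : Int) (h0 : 0 ≤ i) (h1 : i ≤ (m.length : Int)) :
    (growCell m i L).length = max m.length (i.toNat + 1) := by
  unfold growCell
  rw [pyGet?_nonneg _ _ h0]
  by_cases h : i < (m.length : Int)
  · rw [List.getElem?_eq_getElem (by omega : i.toNat < m.length)]
    simp [PySem.List.pySetD_of_nonneg m _ h0]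
    omega
  · rw [List.getElem?_eq_none (by omega : m.length ≤ i.toNat)]
    simp; omega

theorem growAux_spec (row : List String) : ∀ (m : List Int) (i : Int),
    0 ≤ i → i ≤ (m.length : Int) →
    (growAux m i row).length = max m.length (i.toNat + row.length) ∧
    ∀ j : Nat, (growAux m i row)[j]? =
      if (j : Int) < i then m[j]?
      else omerge m[j]? ((row[j - i.toNat]?).map PySem.Str.len) := by
  induction row with
  | nil =>
    intro m i h0 h1
    refine ⟨by simp [growAux]; omega, fun j => ?_⟩
    simp only [growAux, List.getElem?_nil, Option.map_none, omerge_none_right, ite_self]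
  | cons col rest ih =>
    intro m i h0 h1
    have hcl := growCell_length m i (PySem.Str.len col) h0 h1
    have hce := growCell_getElem? m i (PySem.Str.len col) h0 h1
    have h0' : (0:Int) ≤ i + 1 := by omega
    have h1' : i + 1 ≤ ((growCell m i (PySem.Str.len col)).length : Int) := by
      rw [hcl]; omega
    obtain ⟨ihl, ihe⟩ := ih (growCell m i (PySem.Str.len col)) (i+1) h0' h1'
    constructor
    · show (growAux (growCell m i (PySem.Str.len col)) (i+1) rest).length = _
      rw [ihl, hcl]
      simp only [List.length_cons]
      omega
    · intro j
      show (growAux (growCell m i (PySem.Str.len col)) (i+1) rest)[j]? = _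
      rw [ihe j, hce j]
      by_cases hji : (j : Int) < i
      · rw [if_pos (by omega : (j:Int) < i + 1), if_neg (by omega : ¬ j = i.toNat),
            if_pos hji]
      · by_cases hje : j = i.toNat
        · rw [if_pos (by omega : (j:Int) < i + 1), if_pos hje, if_neg hji, hje]
          have : i.toNat - i.toNat = 0 := by omega
          rw [this]
          rfl
        · rw [if_neg (by omega : ¬ (j:Int) < i + 1), if_neg hje, if_neg hji]
          have h2 : j - i.toNat = (j - (i+1).toNat) + 1 := by omega
          rw [h2]
          rfl

theorem foldl_grow_getElem? (table : List (List String)) : ∀ (m : List Int) (j : Nat),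
    (table.foldl (fun m row => growAux m 0 row) m)[j]? =
      table.foldl (fun a r => omerge a ((r[j]?).map PySem.Str.len)) m[j]? := by
  induction table with
  | nil => intro m j; rfl
  | cons r t ih =>
    intro m j
    simp only [List.foldl_cons]
    rw [ih]
    congr 1
    have := (growAux_spec r m 0 (by omega) (by omega)).2 j
    rw [this, if_neg (by omega : ¬ (j:Int) < 0)]
    norm_num

theorem F_some (j : Nat) (table : List (List String)) : ∀ (x : Int),
    table.foldl (fun a r => omerge a ((r[j]?).map PySem.Str.len)) (some x) =
      some ((table.filterMap (fun r => (r[j]?).map PySem.Str.len)).foldl max x) := by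
  induction table with
  | nil => intro x; rfl
  | cons r t ih =>
    intro x
    simp only [List.foldl_cons, List.filterMap_cons]
    cases h : (r[j]?).map PySem.Str.len with
    | none => rw [omerge_none_right]; rw [ih]
    | some v => rw [show omerge (some x) (some v) = some (max x v) from rfl, ih]; rfl

theorem F_none (j : Nat) (table : List (List String)) :
    table.foldl (fun a r => omerge a ((r[j]?).map PySem.Str.len)) none =
      PySem.List.max? (table.filterMap (fun r => (r[j]?).map PySem.Str.len)) (fun x => x) := by
  induction table with
  | nil => rfl
  | cons r t ih =>
    simp only [List.foldl_cons, List.filterMap_cons]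
    cases h : (r[j]?).map PySem.Str.len with
    | none => rw [omerge_none_right]; rw [ih]
    | some v =>
      show t.foldl _ (omerge none (some v)) = _
      show t.foldl _ (some v) = _
      rw [PySem.List.max?_id_cons]
      exact F_some j t v

theorem filterMap_eq_B (j : Nat) (table : List (List String)) :
    (table.filter (fun r => (j : Int) < PySem.List.len r)).map
        (fun r => PySem.Str.len (PySem.List.pyGetD r (j : Int) "")) =
      table.filterMap (fun r => (r[j]?).map PySem.Str.len) := by
  induction table with
  | nil => rfl
  | cons r t ih =>
    simp only [List.filter_cons, List.filterMap_cons]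
    by_cases h : j < r.length
    · rw [if_pos (by simp; omega), List.getElem?_eq_getElem h]
      simp only [List.map_cons, Option.map_some, ih]
      congr 1
      rw [pyGetD_nonneg r (j:Int) "" (by omega)]
      rw [show ((j:Int)).toNat = j from by omega, List.getElem?_eq_getElem h]
      rfl
    · rw [if_neg (by simp; omega), List.getElem?_eq_none (by omega)]
      simpa using ih

-- the width B computes for column k is exactly A's maxlens[k] (0 when the column is absent)
theorem colMax_eq (table : List (List String)) (k : Nat) :
    colMax table (k : Int) =
      PySem.List.pyGetD (table.foldl (fun m row => growAux m 0 row) []) (k : Int) 0 := by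
  rw [pyGetD_nonneg _ _ _ (by omega), show ((k:Int)).toNat = k from by omega,
      foldl_grow_getElem? table [] k]
  simp only [List.getElem?_nil]
  rw [F_none k table]
  unfold colMax
  rw [filterMap_eq_B k table]

-- the chunk B appends for the pair (index, element) of enumerate
def cellE (table : List (List String)) (p : Int × String) : List Char :=
  p.2.toList ++ List.replicate (colMax table p.1 - PySem.Str.len p.2).toNat ' ' ++ ['\t']

-- the text B's loop still has to append to row r's buffer, starting at column i
def rowTail (table : List (List String)) (r : List String) (i : Nat) : List Char :=
  ((PySem.List.enumerate (r.drop i) (i : Int)).map (cellE table)).flatten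

theorem rowTail_nil {table : List (List String)} {r : List String} {i : Nat}
    (h : r.length ≤ i) : rowTail table r i = [] := by
  unfold rowTail
  rw [List.drop_eq_nil_of_le h, PySem.List.enumerate_nil]
  rfl

theorem rowTail_cons {table : List (List String)} {r : List String} {i : Nat}
    (h : i < r.length) :
    rowTail table r i = cellE table ((i : Int), r[i]) ++ rowTail table r (i+1) := by
  unfold rowTail
  rw [List.drop_eq_getElem_cons h, PySem.List.enumerate_cons]
  simp

theorem zipWith_id_of_nil {α β : Type} (f : β → List α) :
    ∀ (bs : List (List α)) (ts : List β), bs.length = ts.length →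
      (∀ t ∈ ts, f t = []) → List.zipWith (fun b t => b ++ f t) bs ts = bs := by
  intro bs
  induction bs with
  | nil => intro ts _ _; rfl
  | cons b bs ih =>
    intro ts hl hf
    cases ts with
    | nil => cases hl
    | cons t ts =>
      simp only [List.zipWith_cons_cons]
      rw [hf t (by simp), List.append_nil, ih ts (by simpa using hl)
          (fun u hu => hf u (by simp [hu]))]

theorem zipWith_zipWith_same {α β γ δ : Type} (g : γ → β → δ) (f : α → β → γ) :
    ∀ (bs : List α) (ts : List β),
      List.zipWith g (List.zipWith f bs ts) ts = List.zipWith (fun b t => g (f b t) t) bs ts := by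
  intro bs
  induction bs with
  | nil => intro ts; rfl
  | cons b bs ih =>
    intro ts
    cases ts with
    | nil => rfl
    | cons t ts => simp only [List.zipWith_cons_cons, ih]

theorem zipWith_replicate_map {α β : Type} (f : α → β → α) (c : α) :
    ∀ (ts : List β), List.zipWith f (List.replicate ts.length c) ts = ts.map (f c) := by
  intro ts
  induction ts with
  | nil => rfl
  | cons t ts ih => simp only [List.length_cons, List.replicate_succ, List.zipWith_cons_cons,
      List.map_cons, ih]

-- what B's while loop computes: append to each buffer the remaining columns of its row
theorem renderCols_spec (table : List (List String)) :
    ∀ (n i : Nat) (bufs : List (List Char)),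
      tableMaxLen table ≤ i + n → bufs.length = table.length →
      renderCols table bufs (i : Int) =
        List.zipWith (fun b r => b ++ rowTail table r i) bufs table := by
  intro n
  induction n with
  | zero =>
    intro i bufs hb hl
    rw [renderCols, dif_neg]
    · rw [zipWith_id_of_nil _ _ _ hl]
      intro r hr
      exact rowTail_nil (le_trans (len_le_tableMaxLen hr) (by omega))
    · simp only [List.any_eq_true, decide_eq_true_eq, PySem.List.len_eq, not_exists, not_and,
        not_lt]
      intro r hr
      exact_mod_cast le_trans (len_le_tableMaxLen hr) (by omega)
  | succ n ih =>
    intro i bufs hb hl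
    rw [renderCols]
    by_cases hc : table.any (fun r => (i : Int) < PySem.List.len r)
    · rw [dif_pos hc]
      have : ((i : Int) + 1) = (((i+1 : Nat)) : Int) := by push_cast; ring
      rw [this, ih (i+1) _ (by omega) (by simp [hl]), zipWith_zipWith_same]
      congr 1
      funext b r
      simp only [PySem.List.len_eq]
      by_cases h : i < r.length
      · rw [if_pos (by exact_mod_cast h), rowTail_cons h, List.append_assoc]
        congr 2
        unfold cellB cellE
        rw [pyGetD_nonneg r (i:Int) "" (by omega), show ((i:Int)).toNat = i from by omega,
            List.getElem?_eq_getElem h]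
        rfl
      · rw [if_neg (by exact_mod_cast h), rowTail_nil (by omega : r.length ≤ i),
            rowTail_nil (by omega : r.length ≤ i + 1), List.append_nil]
    · rw [dif_neg hc]
      rw [zipWith_id_of_nil _ _ _ hl]
      intro r hr
      simp only [List.any_eq_true, decide_eq_true_eq, PySem.List.len_eq, not_exists, not_and,
        not_lt] at hc
      exact rowTail_nil (by exact_mod_cast hc r hr)

-- A-side reshaping (same as a straight-line reading of A's second loop)
theorem renderAux_acc (m : List Int) : ∀ (row : List String) (rv rv' : List Char) (i : Int),
    renderAux m (rv ++ rv') i row = rv ++ renderAux m rv' i row := by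
  intro row
  induction row with
  | nil => intro rv rv' i; rfl
  | cons col rest ih =>
    intro rv rv' i
    show renderAux m ((rv ++ rv') ++ _ ++ _) (i+1) rest = rv ++ renderAux m (rv' ++ _ ++ _) (i+1) rest
    rw [List.append_assoc rv rv', List.append_assoc rv, ← ih]

theorem renderAux_eq_enum (m : List Int) : ∀ (row : List String) (i : Int),
    renderAux m [] i row =
      ((PySem.List.enumerate row i).map (fun p =>
        pyLjust p.2.toList (PySem.List.pyGetD m p.1 0) ' ' ++ ['\t'])).flatten := by
  intro row
  induction row with
  | nil => intro i; simp [renderAux, PySem.List.enumerate_nil]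
  | cons col rest ih =>
    intro i
    show renderAux m ([] ++ (pyLjust col.toList (PySem.List.pyGetD m i 0) ' ' ++ ['\t'])) (i+1) rest = _
    rw [renderAux_acc, PySem.List.enumerate_cons]
    simp only [List.map_cons, List.flatten_cons, List.nil_append]
    rw [show renderAux m (pyLjust col.toList (PySem.List.pyGetD m i 0) ' ' ++ ['\t']) (i+1) rest
        = renderAux m ((pyLjust col.toList (PySem.List.pyGetD m i 0) ' ' ++ ['\t']) ++ []) (i+1) rest by simp,
       renderAux_acc, ih]

theorem render_outer (m : List Int) (table : List (List String)) : ∀ (rv : List Char),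
    table.foldl (fun rv row => renderAux m rv 0 row ++ ['\n']) rv =
      rv ++ (table.map (fun row => renderAux m [] 0 row ++ ['\n'])).flatten := by
  induction table with
  | nil => intro rv; simp
  | cons r t ih =>
    intro rv
    simp only [List.foldl_cons, List.map_cons, List.flatten_cons]
    rw [show renderAux m rv 0 r = renderAux m (rv ++ []) 0 r by simp, renderAux_acc, ih]
    simp [List.append_assoc]

-- per-row: A's ljust chunk at (k, r[k]) is B's cell chunk
theorem row_eq (table : List (List String)) (r : List String) :
    renderAux (table.foldl (fun m row => growAux m 0 row) []) [] 0 r =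
      rowTail table r 0 := by
  rw [renderAux_eq_enum]
  unfold rowTail
  rw [List.drop_zero]
  congr 1
  apply List.map_congr_left
  intro p hp
  rw [PySem.List.mem_enumerate_iff] at hp
  obtain ⟨k, hk, rfl⟩ := hp
  simp only [zero_add]
  unfold cellE pyLjust
  rw [← colMax_eq table k]
  simp only [List.append_assoc]
  congr 2
  congr 1
  have : PySem.Str.len (r[k]) = ((r[k]).toList.length : Int) := by
    rw [PySem.Str.len_eq, String.length_toList]
  rw [this]
  omega

-- ===== VERDICT (by name: the statement is the Claim_ definition above) =====
theorem justify_table_spec : Claim_equal_justify_table := by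
  intro table _
  show justify_table table = justify_table_alt table
  show String.ofList (table.foldl (fun rv row =>
        renderAux (table.foldl (fun m row => growAux m 0 row) []) rv 0 row ++ ['\n']) []) =
      String.ofList ((renderCols table (List.replicate table.length ([] : List Char)) 0).map
        (fun b => b ++ ['\n'])).flatten
  have h0 := renderCols_spec table (tableMaxLen table) 0 (List.replicate table.length [])
    (by omega) (by simp)
  norm_num at h0
  rw [render_outer, List.nil_append, h0, zipWith_replicate_map, List.map_map]
  congr 1
  apply congrArg List.flatten
  apply List.map_congr_left
  intro r _
  simp only [Function.comp, List.nil_append]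
  rw [row_eq]
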